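-- pv_equiv track=rewrite | github.com/gajanankore52/python-programming-lab | commonfactor.py | commonFactor
-- ===== SOURCE A (Python) =====
-- def commonFactor(iVal1, iVal2):
--
--     factor=0
--     iCnt = 1
--     while ((iCnt <= iVal1//2) and (iCnt <= iVal2//2)):
--
--         if iVal1 % iCnt==0 and iVal2 % iCnt==0:
--             factor=iCnt
--         iCnt+=1
--
--     return factor
-- ===== SOURCE B (Python) =====
-- def commonFactor(iVal1, iVal2):
--     limit = min(iVal1 // 2, iVal2 // 2)
--     if limit < 1:
--         return 0
--     a, b = iVal1, iVal2
--     while b: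
--         a, b = b, a % b
--     g = a
--     if g <= limit:
--         return g
--     best = 0
--     d = 1
--     while d * d <= g:
--         if g % d == 0:
--             if d <= limit and d > best:
--                 best = d
--             q = g // d
--             if q <= limit and q > best:
--                 best = q
--         d += 1
--     return best
-- ===== Notes on version B (the rewrite author's own statement) =====
-- stated objective: faster
-- what changed: Replaced the O(min(v1,v2)) linear trial scan up to min(v1//2,v2//2) by Euclid's gcd followed by a sqrt(gcd) divisor scan that picks the largest divisor of the gcd not exceeding the limit.
import Mathlib
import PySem

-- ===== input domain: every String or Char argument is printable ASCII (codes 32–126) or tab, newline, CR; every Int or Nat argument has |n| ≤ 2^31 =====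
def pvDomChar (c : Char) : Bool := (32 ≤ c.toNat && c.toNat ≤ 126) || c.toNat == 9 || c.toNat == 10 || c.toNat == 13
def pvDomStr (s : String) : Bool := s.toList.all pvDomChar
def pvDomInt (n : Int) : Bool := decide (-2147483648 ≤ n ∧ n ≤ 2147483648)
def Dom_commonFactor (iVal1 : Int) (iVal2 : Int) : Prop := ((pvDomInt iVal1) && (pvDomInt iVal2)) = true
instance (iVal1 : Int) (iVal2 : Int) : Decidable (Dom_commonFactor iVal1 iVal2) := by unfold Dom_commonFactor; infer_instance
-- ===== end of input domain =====

-- B replaces A's linear trial scan up to min(iVal1//2, iVal2//2) by Euclid's gcd plus a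
-- square-root divisor scan picking the largest divisor of the gcd within the limit (objective: faster).

-- ===== PORT A =====
-- the while loop of A: iCnt counts up, factor keeps the last common factor seen
def cfLoopA (v1 v2 iCnt factor : Int) : Int :=
  if iCnt ≤ PySem.Int.floordiv v1 2 ∧ iCnt ≤ PySem.Int.floordiv v2 2 then
    cfLoopA v1 v2 (iCnt + 1)
      (if PySem.Int.mod v1 iCnt = 0 ∧ PySem.Int.mod v2 iCnt = 0 then iCnt else factor)
  else factor
termination_by (min (PySem.Int.floordiv v1 2) (PySem.Int.floordiv v2 2) + 1 - iCnt).toNat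
decreasing_by omega

def commonFactor (iVal1 : Int) (iVal2 : Int) : Int := cfLoopA iVal1 iVal2 1 0

-- ===== PORT B =====
-- Source B's `while b: a, b = b, a % b`
def cfEuclid (a b : Int) : Int :=
  if hb : b = 0 then a else cfEuclid b (PySem.Int.mod a b)
termination_by b.natAbs
decreasing_by
  rcases lt_trichotomy b 0 with h1 | h1 | h1
  · have h2 := PySem.Int.mod_neg_bounds a h1
    omega
  · exact absurd h1 hb
  · have h2 := PySem.Int.mod_nonneg a h1
    have h3 := PySem.Int.mod_lt a h1
    omega

-- Source B's `while d * d <= g` divisor scan over g, collecting the best divisor ≤ limit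
def cfLoopB (g limit best d : Int) : Int :=
  if hc : d * d ≤ g then
    cfLoopB g limit
      (if PySem.Int.mod g d = 0 then
        let best' := if d ≤ limit ∧ best < d then d else best
        let q := PySem.Int.floordiv g d
        if q ≤ limit ∧ best' < q then q else best'
      else best)
      (d + 1)
  else best
termination_by (g + 1 - d).toNat
decreasing_by
  have hd : d ≤ g := by nlinarith [mul_self_nonneg d, mul_self_nonneg (d - 1)]
  omega

def commonFactor_alt (iVal1 : Int) (iVal2 : Int) : Int :=
  let limit := min (PySem.Int.floordiv iVal1 2) (PySem.Int.floordiv iVal2 2)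
  if limit < 1 then 0
  else
    let g := cfEuclid iVal1 iVal2
    if g ≤ limit then g
    else cfLoopB g limit 0 1

-- ===== PRECONDITION & SPEC =====
def Spec_commonFactor (iVal1 : Int) (iVal2 : Int) (out : Int) : Prop := out = commonFactor_alt iVal1 iVal2
instance (iVal1 : Int) (iVal2 : Int) (out : Int) : Decidable (Spec_commonFactor iVal1 iVal2 out) := by unfold Spec_commonFactor; infer_instance

-- ===== CLAIM (what is proved, stated in full; the proofs are below) =====
def Claim_equal_commonFactor : Prop := ∀ (iVal1 : Int) (iVal2 : Int), Dom_commonFactor iVal1 iVal2 → Spec_commonFactor iVal1 iVal2 (commonFactor iVal1 iVal2)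

-- ===== LEMMAS AND PROOFS =====

-- the loop bound of A, min(v1 // 2, v2 // 2)
def cfLimit (v1 v2 : Int) : Int := min (PySem.Int.floordiv v1 2) (PySem.Int.floordiv v2 2)

-- what both programs compute: 0 when the bound admits no candidate, otherwise the largest
-- common divisor of v1 and v2 that is ≤ the bound
def CFGood (v1 v2 r : Int) : Prop :=
  (cfLimit v1 v2 < 1 ∧ r = 0) ∨
  (1 ≤ r ∧ r ≤ cfLimit v1 v2 ∧ r ∣ v1 ∧ r ∣ v2 ∧
    ∀ k, r < k → k ≤ cfLimit v1 v2 → ¬(k ∣ v1 ∧ k ∣ v2))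

lemma cfLoopA_good (v1 v2 iCnt factor : Int) :
    (cfLoopA v1 v2 iCnt factor = factor ∧
      ∀ k, iCnt ≤ k → k ≤ cfLimit v1 v2 → ¬(k ∣ v1 ∧ k ∣ v2)) ∨
    (iCnt ≤ cfLoopA v1 v2 iCnt factor ∧ cfLoopA v1 v2 iCnt factor ≤ cfLimit v1 v2 ∧
      cfLoopA v1 v2 iCnt factor ∣ v1 ∧ cfLoopA v1 v2 iCnt factor ∣ v2 ∧
      ∀ k, cfLoopA v1 v2 iCnt factor < k → k ≤ cfLimit v1 v2 → ¬(k ∣ v1 ∧ k ∣ v2)) := by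
  fun_induction cfLoopA v1 v2 iCnt factor with
  | case1 iCnt factor hc ih =>
    have hdv1 := PySem.Int.mod_eq_zero_iff_dvd v1 iCnt
    have hdv2 := PySem.Int.mod_eq_zero_iff_dvd v2 iCnt
    have hcl : iCnt ≤ cfLimit v1 v2 := by unfold cfLimit; omega
    by_cases hdvd : PySem.Int.mod v1 iCnt = 0 ∧ PySem.Int.mod v2 iCnt = 0
    · rw [if_pos hdvd]
      rw [dif_pos hdvd] at ih
      have hdd : iCnt ∣ v1 ∧ iCnt ∣ v2 := ⟨hdv1.mp hdvd.1, hdv2.mp hdvd.2⟩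
      rcases ih with ⟨he, hno⟩ | ⟨h1, h2, h3, h4, h5⟩
      · right
        rw [he]
        exact ⟨le_refl _, hcl, hdd.1, hdd.2, fun k hk1 hk2 => hno k (by omega) hk2⟩
      · exact Or.inr ⟨by omega, h2, h3, h4, h5⟩
    · rw [if_neg hdvd]
      rw [dif_neg hdvd] at ih
      rcases ih with ⟨he, hno⟩ | ⟨h1, h2, h3, h4, h5⟩
      · left
        refine ⟨he, fun k hk1 hk2 hkd => ?_⟩
        rcases eq_or_lt_of_le hk1 with heq | hlt
        · exact hdvd ⟨hdv1.mpr (heq ▸ hkd.1), hdv2.mpr (heq ▸ hkd.2)⟩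
        · exact hno k (by omega) hk2 hkd
      · exact Or.inr ⟨by omega, h2, h3, h4, h5⟩
  | case2 iCnt factor hc =>
    left
    refine ⟨rfl, fun k hk1 hk2 _ => ?_⟩
    unfold cfLimit at hk2
    omega

lemma A_good (v1 v2 : Int) : CFGood v1 v2 (commonFactor v1 v2) := by
  unfold commonFactor CFGood
  rcases cfLoopA_good v1 v2 1 0 with ⟨he, hno⟩ | ⟨h1, h2, h3, h4, h5⟩
  · refine Or.inl ⟨?_, he⟩
    by_contra hL
    exact hno 1 le_rfl (by omega) ⟨one_dvd _, one_dvd _⟩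
  · exact Or.inr ⟨h1, h2, h3, h4, h5⟩

lemma cfEuclid_dvd (a b : Int) : cfEuclid a b ∣ a ∧ cfEuclid a b ∣ b := by
  fun_induction cfEuclid a b with
  | case1 a => exact ⟨dvd_refl a, dvd_zero a⟩
  | case2 a b hne ih =>
    refine ⟨?_, ih.1⟩
    have hid := PySem.Int.floordiv_mul_add_mod a b
    have h3 : cfEuclid b (PySem.Int.mod a b) ∣ PySem.Int.floordiv a b * b + PySem.Int.mod a b :=
      dvd_add (Dvd.dvd.mul_left ih.1 _) ih.2
    rwa [hid] at h3

lemma cfEuclid_dvd_of_dvd (a b k : Int) : k ∣ a → k ∣ b → k ∣ cfEuclid a b := by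
  fun_induction cfEuclid a b with
  | case1 a => exact fun h1 _ => h1
  | case2 a b hne ih =>
    intro h1 h2
    refine ih h2 ?_
    have hid := PySem.Int.floordiv_mul_add_mod a b
    have h3 : PySem.Int.mod a b = a - PySem.Int.floordiv a b * b := by linarith
    rw [h3]
    exact dvd_sub h1 (Dvd.dvd.mul_left h2 _)

lemma cfEuclid_pos (a b : Int) : 0 < a → 0 ≤ b → 0 < cfEuclid a b := by
  fun_induction cfEuclid a b with
  | case1 a => exact fun h1 _ => h1
  | case2 a b hne ih =>
    intro h1 h2
    have hb : 0 < b := lt_of_le_of_ne h2 (Ne.symm hne)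
    exact ih hb (PySem.Int.mod_nonneg a hb)

lemma fdiv_mul_of_dvd (g e : Int) (hd : e ∣ g) :
    PySem.Int.floordiv g e * e = g := by
  have h1 := PySem.Int.floordiv_mul_add_mod g e
  have h2 : PySem.Int.mod g e = 0 := (PySem.Int.mod_eq_zero_iff_dvd g e).mpr hd
  linarith

lemma cfStep_facts (g limit best d b1 : Int) (hd : 1 ≤ d) (hb : 0 ≤ best)
    (hb1 : b1 = if PySem.Int.mod g d = 0 then
        (let best' := if d ≤ limit ∧ best < d then d else best;
         let q := PySem.Int.floordiv g d;
         if q ≤ limit ∧ best' < q then q else best')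
      else best) :
    best ≤ b1 ∧ (b1 = best ∨ (b1 ∣ g ∧ 1 ≤ b1 ∧ b1 ≤ limit)) ∧
    (d ∣ g → d ≤ limit → d ≤ b1) ∧
    (d ∣ g → PySem.Int.floordiv g d ≤ limit → PySem.Int.floordiv g d ≤ b1) := by
  subst hb1
  by_cases hm : PySem.Int.mod g d = 0
  · have hdg : d ∣ g := (PySem.Int.mod_eq_zero_iff_dvd g d).mp hm
    have hq : PySem.Int.floordiv g d * d = g := fdiv_mul_of_dvd g d hdg
    have hqd : PySem.Int.floordiv g d ∣ g := ⟨d, hq.symm⟩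
    rw [if_pos hm]
    dsimp only
    split_ifs with h1 h2 h3
    · exact ⟨by omega, Or.inr ⟨hqd, by omega, h2.1⟩, fun _ _ => by omega, fun _ _ => by omega⟩
    · exact ⟨by omega, Or.inr ⟨hdg, by omega, h1.1⟩, fun _ _ => by omega, fun _ _ => by omega⟩
    · exact ⟨by omega, Or.inr ⟨hqd, by omega, h3.1⟩, fun _ _ => by omega, fun _ _ => by omega⟩
    · exact ⟨le_refl _, Or.inl rfl, fun _ _ => by omega, fun _ _ => by omega⟩
  · rw [if_neg hm]
    exact ⟨le_refl _, Or.inl rfl,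
      fun hdg _ => absurd ((PySem.Int.mod_eq_zero_iff_dvd g d).mpr hdg) hm,
      fun hdg _ => absurd ((PySem.Int.mod_eq_zero_iff_dvd g d).mpr hdg) hm⟩

lemma cfLoopB_good (g limit : Int) : ∀ (d best : Int), 1 ≤ d → 0 ≤ best →
    best ≤ cfLoopB g limit best d ∧
    (cfLoopB g limit best d = best ∨
      (cfLoopB g limit best d ∣ g ∧ 1 ≤ cfLoopB g limit best d ∧ cfLoopB g limit best d ≤ limit)) ∧
    (∀ e, e ∣ g → 1 ≤ e → e ≤ limit → d ≤ e → d ≤ PySem.Int.floordiv g e →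
      e ≤ cfLoopB g limit best d) := by
  intro d best
  fun_induction cfLoopB g limit best d with
  | case1 best d hc ih =>
    intro hd hb
    simp only [dite_eq_ite] at ih ⊢
    obtain ⟨s1, s2, s3, s4⟩ := cfStep_facts g limit best d _ hd hb rfl
    obtain ⟨i1, i2, i3⟩ := ih (by omega) (le_trans hb s1)
    refine ⟨le_trans s1 i1, ?_, ?_⟩
    · rcases i2 with h | h
      · rcases s2 with h' | h'
        · exact Or.inl (h.trans h')
        · refine Or.inr ?_
          rw [h]
          exact h'
      · exact Or.inr h
    · intro e he h1e h2e h3e h4e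
      by_cases hcase : d + 1 ≤ e ∧ d + 1 ≤ PySem.Int.floordiv g e
      · exact i3 e he h1e h2e hcase.1 hcase.2
      · have hed : e = d ∨ PySem.Int.floordiv g e = d := by omega
        rcases hed with rfl | hf
        · exact le_trans (s3 he h2e) i1
        · have hfe : PySem.Int.floordiv g e * e = g := fdiv_mul_of_dvd g e he
          rw [hf] at hfe
          have hdg : d ∣ g := ⟨e, hfe.symm⟩
          have hqe : PySem.Int.floordiv g d = e := by
            have h := fdiv_mul_of_dvd g d hdg
            have h' : PySem.Int.floordiv g d * d = e * d := by linarith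
            exact mul_right_cancel₀ (by omega) h'
          have h5 := s4 hdg (by omega)
          omega
  | case2 best d hc =>
    intro hd hb
    refine ⟨le_refl _, Or.inl rfl, ?_⟩
    intro e he h1e h2e h3e h4e
    exfalso
    have hfe : PySem.Int.floordiv g e * e = g := fdiv_mul_of_dvd g e he
    nlinarith

lemma B_good (v1 v2 : Int) : CFGood v1 v2 (commonFactor_alt v1 v2) := by
  unfold commonFactor_alt CFGood
  dsimp only
  by_cases hL : min (PySem.Int.floordiv v1 2) (PySem.Int.floordiv v2 2) < 1
  · rw [if_pos hL]
    exact Or.inl ⟨hL, rfl⟩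
  · rw [if_neg hL]
    have hL1 : 1 ≤ cfLimit v1 v2 := by unfold cfLimit; omega
    have hv1 : 0 < v1 := by
      have h := (PySem.Int.le_floordiv_iff_mul_le (a := v1) (b := 2) (q := 1) (by omega)).mp
        (by unfold cfLimit at hL1; omega)
      omega
    have hv2 : 0 ≤ v2 := by
      have h := (PySem.Int.le_floordiv_iff_mul_le (a := v2) (b := 2) (q := 1) (by omega)).mp
        (by unfold cfLimit at hL1; omega)
      omega
    have hg : 0 < cfEuclid v1 v2 := cfEuclid_pos v1 v2 hv1 hv2
    have hgd := cfEuclid_dvd v1 v2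
    by_cases hgle : cfEuclid v1 v2 ≤ min (PySem.Int.floordiv v1 2) (PySem.Int.floordiv v2 2)
    · rw [if_pos hgle]
      refine Or.inr ⟨hg, by unfold cfLimit; omega, hgd.1, hgd.2, ?_⟩
      intro k hk1 hk2 ⟨hk3, hk4⟩
      have hkg : k ∣ cfEuclid v1 v2 := cfEuclid_dvd_of_dvd v1 v2 k hk3 hk4
      have := Int.le_of_dvd hg hkg
      omega
    · rw [if_neg hgle]
      obtain ⟨i1, i2, i3⟩ := cfLoopB_good (cfEuclid v1 v2)
        (min (PySem.Int.floordiv v1 2) (PySem.Int.floordiv v2 2)) 1 0 le_rfl le_rfl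
      have hq1 : PySem.Int.floordiv (cfEuclid v1 v2) 1 = cfEuclid v1 v2 := by
        have := fdiv_mul_of_dvd (cfEuclid v1 v2) 1 (one_dvd _)
        omega
      have h1r : 1 ≤ cfLoopB (cfEuclid v1 v2)
          (min (PySem.Int.floordiv v1 2) (PySem.Int.floordiv v2 2)) 0 1 := by
        refine i3 1 (one_dvd _) le_rfl (by unfold cfLimit at hL1; omega) le_rfl ?_
        omega
      rcases i2 with h | ⟨hdvd, hge1, hle⟩
      · omega
      · refine Or.inr ⟨hge1, by unfold cfLimit; omega, dvd_trans hdvd hgd.1, dvd_trans hdvd hgd.2, ?_⟩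
        intro k hk1 hk2 ⟨hk3, hk4⟩
        have hkg : k ∣ cfEuclid v1 v2 := cfEuclid_dvd_of_dvd v1 v2 k hk3 hk4
        have hkpos : 0 < k := by omega
        have hfk := fdiv_mul_of_dvd (cfEuclid v1 v2) k hkg
        have hklt : k < cfEuclid v1 v2 := by unfold cfLimit at hk2; omega
        have hfk1 : 1 ≤ PySem.Int.floordiv (cfEuclid v1 v2) k := by nlinarith
        have := i3 k hkg (by omega) (by unfold cfLimit at hk2; omega) (by omega) hfk1
        omega

lemma CFGood_unique (v1 v2 r1 r2 : Int) (h1 : CFGood v1 v2 r1) (h2 : CFGood v1 v2 r2) :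
    r1 = r2 := by
  rcases h1 with ⟨hL1, he1⟩ | ⟨ha1, hb1, hc1, hd1, hm1⟩ <;>
    rcases h2 with ⟨hL2, he2⟩ | ⟨ha2, hb2, hc2, hd2, hm2⟩
  · omega
  · omega
  · omega
  · by_contra hne
    rcases lt_or_gt_of_ne hne with h | h
    · exact hm1 r2 h hb2 ⟨hc2, hd2⟩
    · exact hm2 r1 h hb1 ⟨hc1, hd1⟩

-- ===== VERDICT (by name: the statement is the Claim_ definition above) =====
theorem commonFactor_spec : Claim_equal_commonFactor := by
  intro v1 v2 _
  unfold Spec_commonFactor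
  exact CFGood_unique v1 v2 _ _ (A_good v1 v2) (B_good v1 v2)
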